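-- pv_equiv track=rewrite | github.com/RbotJ/DiscordReader | features/ingestion/validator.py | validate_basic_message_fields
-- ===== SOURCE A (Python) =====
-- from typing import Dict, Any, List, Optional, Tuple
--
-- def validate_basic_message_fields(message: Dict[str, Any]) -> bool:
--     """
--     Basic validation matching the original Discord storage validation.
--     Checks only core required fields: id, content, author, timestamp.
--
--     Args:
--         message: Message dictionary to validate
--
--     Returns:
--         bool: True if all required fields exist and are non-empty
--     """
--     required_fields = ['id', 'content', 'author', 'timestamp']
--
--     # Check all required fields exist
--     if not all(field in message for field in required_fields):
--         return False
--
--     # Check fields are not empty or None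
--     for field in required_fields:
--         if not message[field] or str(message[field]).strip() == "":
--             return False
--
--     return True
-- ===== SOURCE B (Python) =====
-- def validate_basic_message_fields(message):
--     # One pass over the message's own items: count how many required fields
--     # carry a non-blank value; valid iff all four are counted (dict keys are unique).
--     required = {'id', 'content', 'author', 'timestamp'}
--     satisfied = 0
--     for key, value in message.items():
--         if key in required and value and str(value).strip() != "":
--             satisfied += 1
--     return satisfied == 4
-- ===== Notes on version B (the rewrite author's own statement) =====
-- stated objective: alternative
-- what changed: Inverted the traversal: instead of A's two passes over the fixed required-field list with dict lookups, B makes one pass over the message's own items, counting required fields that carry a non-blank value, and compares the count to 4.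
import Mathlib
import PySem

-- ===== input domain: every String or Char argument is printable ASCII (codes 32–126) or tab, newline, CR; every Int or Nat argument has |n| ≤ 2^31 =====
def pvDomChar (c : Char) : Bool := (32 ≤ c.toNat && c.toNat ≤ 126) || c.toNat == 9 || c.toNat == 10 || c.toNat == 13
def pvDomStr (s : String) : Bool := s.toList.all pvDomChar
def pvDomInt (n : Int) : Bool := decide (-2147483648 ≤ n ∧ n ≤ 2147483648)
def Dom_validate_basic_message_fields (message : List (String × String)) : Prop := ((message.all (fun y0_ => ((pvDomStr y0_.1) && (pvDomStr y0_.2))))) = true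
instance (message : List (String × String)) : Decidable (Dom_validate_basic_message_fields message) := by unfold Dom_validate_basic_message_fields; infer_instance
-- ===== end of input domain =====

-- ===== PORT A =====
-- A checks the four required fields by dict lookup (presence pass, then a value loop);
-- B scans the message's items once, counting required fields with non-blank values (objective: alternative).
def pvFields : List String := ["id", "content", "author", "timestamp"]

-- A's second loop: for field in required_fields: if not message[field] or str(message[field]).strip() == "": return False
def pvLoopA (message : List (String × String)) : List String → Bool
  | [] => true
  | f :: rest =>
    let v := ((PySem.Dict.mk message).get? f).getD ""  -- presence already ensured by the all(...) pass
    if v == "" || PySem.Str.strip v == "" then false else pvLoopA message rest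

def validate_basic_message_fields (message : List (String × String)) : Bool :=
  if !(pvFields.all (fun f => ((PySem.Dict.mk message).get? f).isSome)) then false
  else pvLoopA message pvFields

-- ===== PORT B =====
-- B: satisfied = 0; for key, value in message.items(): if key in required and value and str(value).strip() != "": satisfied += 1; return satisfied == 4
def validate_basic_message_fields_alt (message : List (String × String)) : Bool :=
  let required : List String := ["id", "content", "author", "timestamp"]
  let satisfied : Nat := message.foldl
    (fun acc p => if required.contains p.1 && !(p.2 == "") && !(PySem.Str.strip p.2 == "") then acc + 1 else acc) 0
  satisfied == 4

-- ===== PRECONDITION & SPEC =====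
-- Pre_ excludes association lists with duplicate keys: a Python dict cannot contain them, so any
-- behaviour on that encoding is an artefact of the representation, not of either program.
def Pre_validate_basic_message_fields (message : List (String × String)) : Prop :=
  (message.map Prod.fst).Nodup
instance (message : List (String × String)) : Decidable (Pre_validate_basic_message_fields message) := by
  unfold Pre_validate_basic_message_fields; infer_instance
def pvWitness_validate_basic_message_fields : (List (String × String)) :=
  [("id", "1"), ("content", "hello"), ("author", "bob"), ("timestamp", "t0")]
def Spec_validate_basic_message_fields (message : List (String × String)) (out : Bool) : Prop := out = validate_basic_message_fields_alt message
instance (message : List (String × String)) (out : Bool) : Decidable (Spec_validate_basic_message_fields message out) := by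
  unfold Spec_validate_basic_message_fields; infer_instance

-- ===== CLAIM =====
def Claim_equal_validate_basic_message_fields : Prop := ∀ (message : List (String × String)), Dom_validate_basic_message_fields message → Pre_validate_basic_message_fields message → Spec_validate_basic_message_fields message (validate_basic_message_fields message)

-- ===== LEMMAS AND PROOFS =====

-- the per-pair test of B's loop
def pvOkPair (p : String × String) : Bool :=
  (["id", "content", "author", "timestamp"] : List String).contains p.1 && !(p.2 == "") && !(PySem.Str.strip p.2 == "")

-- one field's verdict, as A computes it (lookup, then the blank test)
def pvOkField (message : List (String × String)) (f : String) : Bool :=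
  match (PySem.Dict.mk message).get? f with
  | some v => !(v == "") && !(PySem.Str.strip v == "")
  | none => false

lemma pv_foldl_eq_countP (message : List (String × String)) (n : Nat) :
    message.foldl (fun acc p => if pvOkPair p then acc + 1 else acc) n
      = n + message.countP pvOkPair := by
  induction message generalizing n with
  | nil => simp
  | cons p rest ih =>
    by_cases h : pvOkPair p = true <;> simp [List.countP_cons, h, ih] <;> omega

lemma pv_count_one_field (f : String) (Q : String → Bool) (message : List (String × String))
    (h : (message.map Prod.fst).Nodup) :
    message.countP (fun p => p.1 == f && Q p.2)
      = (match (PySem.Dict.mk message).get? f with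
         | some v => if Q v then 1 else 0
         | none => 0) := by
  induction message with
  | nil => simp [PySem.Dict.get?]
  | cons p rest ih =>
    obtain ⟨k, v⟩ := p
    simp only [List.map_cons, List.nodup_cons] at h
    rw [List.countP_cons, PySem.Dict.get?_mk_cons]
    by_cases hk : k = f
    · subst hk
      have hzero : rest.countP (fun p => p.1 == k && Q p.2) = 0 := by
        rw [List.countP_eq_zero]
        intro q hq
        have : q.1 ∈ rest.map Prod.fst := List.mem_map_of_mem hq
        simp only [Bool.and_eq_true, beq_iff_eq]
        rintro ⟨rfl, -⟩
        exact h.1 this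
      simp [hzero]
    · have hne : (k == f) = false := by simpa using hk
      simp [hne, ih h.2]

lemma pv_countP_split (message : List (String × String)) :
    message.countP pvOkPair
      = message.countP (fun p => p.1 == "id" && (!(p.2 == "") && !(PySem.Str.strip p.2 == "")))
        + message.countP (fun p => p.1 == "content" && (!(p.2 == "") && !(PySem.Str.strip p.2 == "")))
        + message.countP (fun p => p.1 == "author" && (!(p.2 == "") && !(PySem.Str.strip p.2 == "")))
        + message.countP (fun p => p.1 == "timestamp" && (!(p.2 == "") && !(PySem.Str.strip p.2 == ""))) := by
  induction message with
  | nil => simp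
  | cons p rest ih =>
    simp only [List.countP_cons]
    by_cases h1 : p.1 = "id" <;> by_cases h2 : p.1 = "content" <;>
      by_cases h3 : p.1 = "author" <;> by_cases h4 : p.1 = "timestamp" <;>
      simp_all [pvOkPair] <;> omega

lemma pv_alt_eq_ok (message : List (String × String))
    (h : (message.map Prod.fst).Nodup) :
    validate_basic_message_fields_alt message
      = (pvOkField message "id" && pvOkField message "content"
          && pvOkField message "author" && pvOkField message "timestamp") := by
  rw [show validate_basic_message_fields_alt message
        = ((message.foldl (fun acc p => if pvOkPair p then acc + 1 else acc) 0) == 4) from rfl,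
    pv_foldl_eq_countP, Nat.zero_add, pv_countP_split]
  simp only [pv_count_one_field "id" (fun v => !(v == "") && !(PySem.Str.strip v == "")) message h,
    pv_count_one_field "content" (fun v => !(v == "") && !(PySem.Str.strip v == "")) message h,
    pv_count_one_field "author" (fun v => !(v == "") && !(PySem.Str.strip v == "")) message h,
    pv_count_one_field "timestamp" (fun v => !(v == "") && !(PySem.Str.strip v == "")) message h]
  unfold pvOkField
  cases (PySem.Dict.mk message).get? "id" <;>
    cases (PySem.Dict.mk message).get? "content" <;>
    cases (PySem.Dict.mk message).get? "author" <;>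
    cases (PySem.Dict.mk message).get? "timestamp" <;>
    simp <;> split_ifs <;> simp_all

lemma pv_a_eq_ok (message : List (String × String)) :
    validate_basic_message_fields message
      = (pvOkField message "id" && pvOkField message "content"
          && pvOkField message "author" && pvOkField message "timestamp") := by
  unfold validate_basic_message_fields pvFields pvOkField
  cases h1 : (PySem.Dict.mk message).get? "id" <;>
    cases h2 : (PySem.Dict.mk message).get? "content" <;>
    cases h3 : (PySem.Dict.mk message).get? "author" <;>
    cases h4 : (PySem.Dict.mk message).get? "timestamp" <;>
    simp [pvLoopA, h1, h2, h3, h4, Bool.beq_eq_decide_eq] <;>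
    first | rfl | ac_rfl

-- ===== VERDICT =====
theorem validate_basic_message_fields_spec : Claim_equal_validate_basic_message_fields := by
  intro message _ hpre
  unfold Spec_validate_basic_message_fields
  rw [pv_a_eq_ok, pv_alt_eq_ok message hpre]
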